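-- pv_equiv track=rewrite | github.com/abc-peixoto/trabalho_individual_2_FPAA | main.py | maxmin_select
-- ===== SOURCE A (Python) =====
-- from typing import Iterable, Tuple, List
--
-- def maxmin_select(arr: Iterable[int]) -> Tuple[int, int]:
--     arr = list(arr)
--     n = len(arr)
--     if n == 0:
--         raise ValueError("Sequência vazia.")
--     if n == 1:
--         return arr[0], arr[0]
--     if n == 2:
--         a, b = arr[0], arr[1]
--         return (a, b) if a <= b else (b, a)
--     mid = n // 2
--     mn1, mx1 = maxmin_select(arr[:mid])
--     mn2, mx2 = maxmin_select(arr[mid:])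
--     mn = mn1 if mn1 <= mn2 else mn2
--     mx = mx1 if mx1 >= mx2 else mx2
--     return mn, mx
-- ===== SOURCE B (Python) =====
-- from typing import Iterable, Tuple
--
-- def maxmin_select(arr: Iterable[int]) -> Tuple[int, int]:
--     arr = list(arr)
--     if not arr:
--         raise ValueError("Sequência vazia.")
--     mn = mx = arr[0]
--     for v in arr[1:]:
--         if v < mn:
--             mn = v
--         if v > mx:
--             mx = v
--     return mn, mx
-- ===== Notes on version B (the rewrite author's own statement) =====
-- stated objective: simpler
-- what changed: Replaced A's divide-and-conquer recursion (list slicing, halving, merging partial results) with a single linear pass that keeps a running minimum and maximum.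
import Mathlib
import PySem

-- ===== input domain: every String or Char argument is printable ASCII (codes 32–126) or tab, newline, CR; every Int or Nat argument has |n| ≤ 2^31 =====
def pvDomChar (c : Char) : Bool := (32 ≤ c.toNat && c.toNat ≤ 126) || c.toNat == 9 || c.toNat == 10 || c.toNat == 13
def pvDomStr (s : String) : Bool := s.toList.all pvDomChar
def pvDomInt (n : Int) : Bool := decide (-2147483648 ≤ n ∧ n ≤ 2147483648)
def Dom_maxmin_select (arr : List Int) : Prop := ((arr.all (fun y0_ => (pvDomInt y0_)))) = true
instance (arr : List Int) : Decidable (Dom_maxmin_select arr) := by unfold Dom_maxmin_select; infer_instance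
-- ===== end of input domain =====

-- B replaces A's divide-and-conquer min/max with a single linear pass keeping a running (mn, mx): simpler.


-- ===== PORT A =====
-- Literal port of A's recursive halving. On the empty list A raises ValueError
-- (excluded by Pre_); the port returns (0, 0) there.
-- n // 2 with n = len(arr) ≥ 3: Python floordiv on nonnegative ints = Nat division.
def maxmin_select (arr : List Int) : Int × Int :=
  let n := arr.length
  if n = 0 then (0, 0)  -- A: raise ValueError("Sequência vazia.")
  else if n = 1 then (arr.headD 0, arr.headD 0)      -- arr[0] (in range)
  else if n = 2 then
    let a := arr.headD 0                             -- arr[0]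
    let b := (arr.drop 1).headD 0                    -- arr[1]
    if a ≤ b then (a, b) else (b, a)
  else
    let mid := n / 2
    let p1 := maxmin_select (PySem.List.slice arr none (some (mid : Int)))       -- arr[:mid]
    let p2 := maxmin_select (PySem.List.slice arr (some (mid : Int)) none)       -- arr[mid:]
    (if p1.1 ≤ p2.1 then p1.1 else p2.1, if p1.2 ≥ p2.2 then p1.2 else p2.2)
termination_by arr.length
decreasing_by
  · rw [PySem.List.slice_to_natCast]
    simp only [List.length_take]
    omega
  · rw [PySem.List.slice_from_natCast]
    simp only [List.length_drop]
    omega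

-- ===== PORT B =====
-- Literal port of Source B: mn = mx = arr[0]; one pass over arr[1:] updating both.
-- On the empty list Source B raises ValueError (excluded by Pre_); the port returns (0, 0).
def maxmin_select_alt (arr : List Int) : Int × Int :=
  match arr with
  | [] => (0, 0)  -- B: raise ValueError("Sequência vazia.")
  | x :: xs =>
    xs.foldl (fun p v => (if v < p.1 then v else p.1, if v > p.2 then v else p.2)) (x, x)

-- ===== PRECONDITION & SPEC =====
-- Both programs raise ValueError("Sequência vazia.") on the empty list; Pre_ excludes exactly it.
def Pre_maxmin_select (arr : List Int) : Prop := arr ≠ []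
instance (arr : List Int) : Decidable (Pre_maxmin_select arr) := by unfold Pre_maxmin_select; infer_instance
def pvWitness_maxmin_select : List Int := [3, -1, 7, 7, 0]

def Spec_maxmin_select (arr : List Int) (out : Int × Int) : Prop := out = maxmin_select_alt arr
instance (arr : List Int) (out : Int × Int) : Decidable (Spec_maxmin_select arr out) := by unfold Spec_maxmin_select; infer_instance

-- ===== CLAIM (what is proved, stated in full; the proofs are below) =====
def Claim_equal_maxmin_select : Prop := ∀ (arr : List Int), Dom_maxmin_select arr → Pre_maxmin_select arr → Spec_maxmin_select arr (maxmin_select arr)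

-- ===== LEMMAS AND PROOFS =====

-- B's fold step equals the pair of min/max folds (independent accumulators).
theorem fold_pair (xs : List Int) : ∀ a b : Int,
    xs.foldl (fun p v => (if v < p.1 then v else p.1, if v > p.2 then v else p.2)) (a, b)
      = (xs.foldl min a, xs.foldl max b) := by
  induction xs with
  | nil => intro a b; rfl
  | cons v vs ih =>
    intro a b
    have hmin : (if v < a then v else a) = min a v := by rw [min_def]; split_ifs <;> omega
    have hmax : (if v > b then v else b) = max b v := by rw [max_def]; split_ifs <;> omega
    simp only [List.foldl_cons, hmin, hmax, ih]

-- B's fold computes (foldl min, foldl max).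
theorem alt_char (x : Int) (xs : List Int) :
    maxmin_select_alt (x :: xs) = (xs.foldl min x, xs.foldl max x) := by
  show xs.foldl _ (x, x) = _
  exact fold_pair xs x x

theorem foldl_min_min (l : List Int) : ∀ x y, l.foldl min (min x y) = min x (l.foldl min y) := by
  induction l with
  | nil => intro x y; rfl
  | cons a l ih =>
    intro x y
    simp only [List.foldl_cons, min_assoc, ih]

theorem foldl_max_max (l : List Int) : ∀ x y, l.foldl max (max x y) = max x (l.foldl max y) := by
  induction l with
  | nil => intro x y; rfl
  | cons a l ih =>
    intro x y
    simp only [List.foldl_cons, max_assoc, ih]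

theorem foldl_min_append (x y : Int) (as bs : List Int) :
    (as ++ y :: bs).foldl min x = min (as.foldl min x) (bs.foldl min y) := by
  rw [List.foldl_append, List.foldl_cons, foldl_min_min]

theorem foldl_max_append (x y : Int) (as bs : List Int) :
    (as ++ y :: bs).foldl max x = max (as.foldl max x) (bs.foldl max y) := by
  rw [List.foldl_append, List.foldl_cons, foldl_max_max]

-- A computes (foldl min, foldl max) on any nonempty list.
theorem a_char : ∀ (n : Nat) (x : Int) (xs : List Int), (x :: xs).length ≤ n →
    maxmin_select (x :: xs) = (xs.foldl min x, xs.foldl max x) := by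
  intro n
  induction n with
  | zero => intro x xs h; simp at h
  | succ n ih =>
    intro x xs hlen
    match xs with
    | [] => rw [maxmin_select]; norm_num
    | [y] =>
      rw [maxmin_select]
      norm_num [min_def, max_def]
      split_ifs <;> simp_all
    | y :: z :: rest =>
      rw [maxmin_select]
      have hne0 : ¬ (x :: y :: z :: rest).length = 0 := by simp
      have hne1 : ¬ (x :: y :: z :: rest).length = 1 := by simp
      have hne2 : ¬ (x :: y :: z :: rest).length = 2 := by simp
      simp only [hne0, hne1, hne2, if_false]
      set arr := x :: y :: z :: rest with harr
      have hL : arr.length = rest.length + 3 := by simp [harr]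
      set mid := arr.length / 2 with hmid
      rw [PySem.List.slice_to_natCast, PySem.List.slice_from_natCast]
      have hmid1 : 1 ≤ mid := by omega
      have hmidlt : mid < arr.length := by omega
      -- decompose take and drop as cons
      obtain ⟨as, has⟩ : ∃ as, arr.take mid = x :: as := by
        match hm : mid with
        | 0 => omega
        | m + 1 => exact ⟨(y :: z :: rest).take m, by simp [harr]⟩
      have hdne : arr.drop mid ≠ [] := by
        intro h
        have := congrArg List.length h
        simp at this
        omega
      obtain ⟨b, bs, hbs⟩ : ∃ b bs, arr.drop mid = b :: bs := by
        match hd : arr.drop mid with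
        | [] => exact absurd hd hdne
        | b :: bs => exact ⟨b, bs, rfl⟩
      have hta : (arr.take mid).length ≤ n := by
        simp only [List.length_take]
        omega
      have htd : (arr.drop mid).length ≤ n := by
        rw [List.length_drop]
        omega
      rw [has] at hta ⊢
      rw [hbs] at htd ⊢
      rw [ih x as (by simpa using hta), ih b bs (by simpa using htd)]
      have hsplit : x :: (as ++ b :: bs) = x :: y :: z :: rest := by
        have : arr.take mid ++ arr.drop mid = arr := List.take_append_drop mid arr
        rw [has, hbs] at this
        simpa [harr] using this
      have hxs : y :: z :: rest = as ++ b :: bs := by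
        have := hsplit
        injection this with _ h2
        exact h2.symm
      simp only [hxs, foldl_min_append, foldl_max_append]
      have e1 : (if as.foldl min x ≤ bs.foldl min b then as.foldl min x else bs.foldl min b)
          = min (as.foldl min x) (bs.foldl min b) := by rw [min_def]
      have e2 : (if as.foldl max x ≥ bs.foldl max b then as.foldl max x else bs.foldl max b)
          = max (as.foldl max x) (bs.foldl max b) := by
        rw [max_def]; split_ifs with h1 h2 h2 <;> omega
      rw [e1, e2]

-- ===== VERDICT (by name: the statement is the Claim_ definition above) =====
theorem maxmin_select_spec : Claim_equal_maxmin_select := by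
  intro arr _ hpre
  match arr with
  | [] => exact absurd rfl hpre
  | x :: xs =>
    show maxmin_select (x :: xs) = maxmin_select_alt (x :: xs)
    rw [a_char (x :: xs).length x xs le_rfl, alt_char]
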